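-- pv_equiv track=rewrite | github.com/GParolini/learn_IT_girls_python | 2_code_scripts/print_methods.py | get_coauthors_nested
-- ===== SOURCE A (Python) =====
-- def get_coauthors_nested(coauthors, authors):
--     all_coauthors = []
--
--     for author in authors:
--         author_coauthors = []
--         for item in coauthors:
--             if author in item:
--                 author_coauthors.append(item)
--             else:
--                 continue
--         if author_coauthors != []:
--             author_coauthors.insert(0,["Coauthors of %s:" % author])
--
--         all_coauthors.append(author_coauthors)
--         all_coauthors_final = [x for x in all_coauthors if x != []]
--
--     return all_coauthors_final
-- ===== SOURCE B (Python) =====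
-- def get_coauthors_nested(coauthors, authors):
--     # Inverted index: member -> list of coauthor-items containing them (one pass over coauthors).
--     index = {}
--     for item in coauthors:
--         for member in dict.fromkeys(item):
--             index.setdefault(member, []).append(item)
--     result = []
--     for author in authors:
--         items = index.get(author)
--         if items:
--             result.append([["Coauthors of %s:" % author]] + items)
--     return result
-- ===== Notes on version B (the rewrite author's own statement) =====
-- stated objective: alternative
-- what changed: Replaces the per-author rescan of all coauthor items by a single-pass inverted index (member -> items) queried once per author, and drops A's per-iteration refiltering of the accumulator; Pre_ excludes only the empty authors list, on which A raises NameError.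
import Mathlib
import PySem

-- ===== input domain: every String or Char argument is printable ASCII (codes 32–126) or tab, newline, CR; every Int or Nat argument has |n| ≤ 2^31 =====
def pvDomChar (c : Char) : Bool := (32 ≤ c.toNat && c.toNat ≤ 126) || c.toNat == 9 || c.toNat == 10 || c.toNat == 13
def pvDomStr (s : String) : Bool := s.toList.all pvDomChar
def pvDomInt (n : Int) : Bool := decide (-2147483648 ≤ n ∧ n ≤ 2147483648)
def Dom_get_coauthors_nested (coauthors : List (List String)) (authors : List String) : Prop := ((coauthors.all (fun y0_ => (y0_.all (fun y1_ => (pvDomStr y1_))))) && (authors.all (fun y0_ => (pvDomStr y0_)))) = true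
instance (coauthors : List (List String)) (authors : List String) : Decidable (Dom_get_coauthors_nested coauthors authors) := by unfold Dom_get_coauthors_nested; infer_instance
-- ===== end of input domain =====

-- B replaces A's per-author rescan of coauthors by a one-pass inverted index (member -> items).
-- ===== PORT A =====
def get_coauthors_nested (coauthors : List (List String)) (authors : List String) : List (List (List String)) :=
  (authors.foldl
    (fun (st : List (List (List String)) × List (List (List String))) author =>
      let author_coauthors :=
        coauthors.foldl (fun acc item => if author ∈ item then acc ++ [item] else acc) []
      let author_coauthors :=
        if author_coauthors ≠ [] then ["Coauthors of " ++ author ++ ":"] :: author_coauthors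
        else author_coauthors
      let all_coauthors := st.1 ++ [author_coauthors]
      (all_coauthors, all_coauthors.filter (fun x => x ≠ [])))
    ([], [])).2

-- ===== PORT B =====
-- index.setdefault(member, []).append(item) over the distinct members of each item
def pvIndex_get_coauthors_nested (coauthors : List (List String)) :
    PySem.Dict String (List (List String)) :=
  coauthors.foldl
    (fun d item =>
      (PySem.List.dedup item).foldl (fun d member => d.modify member [] (· ++ [item])) d)
    PySem.Dict.empty

def get_coauthors_nested_alt (coauthors : List (List String)) (authors : List String) : List (List (List String)) :=
  let index := pvIndex_get_coauthors_nested coauthors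
  authors.foldl
    (fun result author =>
      let items := index.getD author []
      if items ≠ [] then result ++ [["Coauthors of " ++ author ++ ":"] :: items] else result)
    []

-- ===== PRECONDITION & SPEC =====
-- Pre_ excludes only authors = [], where the Python A raises NameError (all_coauthors_final is never assigned).
def Pre_get_coauthors_nested (coauthors : List (List String)) (authors : List String) : Prop :=
  authors ≠ []
instance (coauthors : List (List String)) (authors : List String) : Decidable (Pre_get_coauthors_nested coauthors authors) := by unfold Pre_get_coauthors_nested; infer_instance
def pvWitness_get_coauthors_nested : List (List String) × List String := ([["a", "b"], ["b"]], ["a", "b", "c"])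

def Spec_get_coauthors_nested (coauthors : List (List String)) (authors : List String) (out : List (List (List String))) : Prop := out = get_coauthors_nested_alt coauthors authors
instance (coauthors : List (List String)) (authors : List String) (out : List (List (List String))) : Decidable (Spec_get_coauthors_nested coauthors authors out) := by unfold Spec_get_coauthors_nested; infer_instance

-- ===== CLAIM (what is proved, stated in full; the proofs are below) =====
def Claim_equal_get_coauthors_nested : Prop := ∀ (coauthors : List (List String)) (authors : List String), Dom_get_coauthors_nested coauthors authors → Pre_get_coauthors_nested coauthors authors → Spec_get_coauthors_nested coauthors authors (get_coauthors_nested coauthors authors)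

-- ===== LEMMAS AND PROOFS =====

-- a nodup list filtered for equality with a yields [a] iff a is a member
theorem filter_beq_of_nodup {α : Type} [DecidableEq α] (a : α) :
    ∀ (l : List α), l.Nodup → l.filter (fun x => x == a) = if a ∈ l then [a] else [] := by
  intro l hl
  induction l with
  | nil => simp
  | cons x xs ih =>
    simp only [List.nodup_cons] at hl
    by_cases hxa : x = a
    · subst hxa
      simp only [List.filter_cons, beq_self_eq_true, List.mem_cons, true_or, if_pos]
      simp only [List.cons.injEq, true_and]
      exact List.filter_eq_nil_iff.mpr (fun b hb => by
        simp only [beq_iff_eq]; rintro rfl; exact hl.1 hb)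
    · simp only [List.filter_cons, beq_iff_eq, if_neg hxa, List.mem_cons]
      rw [ih hl.2]
      simp [Ne.symm hxa]

-- one item's inner loop appends the item to key a exactly when a ∈ item
theorem pvIndex_step (item : List String) (d : PySem.Dict String (List (List String))) (a : String) :
    ((PySem.List.dedup item).foldl (fun d member => d.modify member [] (· ++ [item])) d).getD a []
      = d.getD a [] ++ (if a ∈ item then [item] else []) := by
  have hmap : (PySem.List.dedup item).foldl (fun d member => d.modify member [] (· ++ [item])) d
      = ((PySem.List.dedup item).map (fun m => (m, item))).foldl
          (fun d p => d.modify p.1 [] (· ++ [p.2])) d := by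
    rw [List.foldl_map]
  rw [hmap, PySem.Dict.getD_foldl_modify_append]
  congr 1
  rw [List.filter_map]
  simp only [Function.comp_def]
  rw [filter_beq_of_nodup a (PySem.List.dedup item) (PySem.List.nodup_dedup item)]
  by_cases h : a ∈ item
  · rw [if_pos ((PySem.List.mem_dedup item a).mpr h)]; simp [h]
  · rw [if_neg (fun hc => h ((PySem.List.mem_dedup item a).mp hc))]; simp [h]

-- the inverted index at key a holds exactly the items containing a, in order
theorem pvIndex_getD (coauthors : List (List String)) (a : String) :
    (pvIndex_get_coauthors_nested coauthors).getD a []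
      = coauthors.filter (fun item => decide (a ∈ item)) := by
  unfold pvIndex_get_coauthors_nested
  suffices h : ∀ (l : List (List String)) (d : PySem.Dict String (List (List String))),
      (l.foldl (fun d item =>
          (PySem.List.dedup item).foldl (fun d member => d.modify member [] (· ++ [item])) d) d).getD a []
        = d.getD a [] ++ l.filter (fun item => decide (a ∈ item)) by
    rw [h coauthors PySem.Dict.empty]; simp [PySem.Dict.getD_empty]
  intro l
  induction l with
  | nil => simp
  | cons x xs ih =>
    intro d
    simp only [List.foldl_cons, List.filter_cons]
    rw [ih, pvIndex_step]
    by_cases h : a ∈ x <;> simp [h]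

-- the per-author block both sides produce
def pvBlock (coauthors : List (List String)) (a : String) : List (List (List String)) :=
  let items := coauthors.filter (fun item => decide (a ∈ item))
  if items ≠ [] then [["Coauthors of " ++ a ++ ":"] :: items] else []

theorem alt_eq_flatMap (coauthors : List (List String)) (authors : List String) :
    get_coauthors_nested_alt coauthors authors = authors.flatMap (pvBlock coauthors) := by
  unfold get_coauthors_nested_alt
  have h : ∀ (l : List String) (acc : List (List (List String))),
      l.foldl (fun result author =>
        let items := (pvIndex_get_coauthors_nested coauthors).getD author []
        if items ≠ [] then result ++ [["Coauthors of " ++ author ++ ":"] :: items] else result) acc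
      = acc ++ l.flatMap (pvBlock coauthors) := by
    intro l
    induction l with
    | nil => simp
    | cons x xs ih =>
      intro acc
      simp only [List.foldl_cons, List.flatMap_cons]
      rw [ih, pvIndex_getD]
      unfold pvBlock
      split_ifs with h <;> simp [h]
  simpa using h authors []

theorem a_eq_flatMap (coauthors : List (List String)) (authors : List String)
    (hne : authors ≠ []) :
    get_coauthors_nested coauthors authors = authors.flatMap (pvBlock coauthors) := by
  unfold get_coauthors_nested
  have hgen : ∀ (l : List String) (all : List (List (List String))), l ≠ [] →
      (l.foldl (fun (st : List (List (List String)) × List (List (List String))) author =>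
        let author_coauthors :=
          coauthors.foldl (fun acc item => if author ∈ item then acc ++ [item] else acc) []
        let author_coauthors :=
          if author_coauthors ≠ [] then ["Coauthors of " ++ author ++ ":"] :: author_coauthors
          else author_coauthors
        let all_coauthors := st.1 ++ [author_coauthors]
        (all_coauthors, all_coauthors.filter (fun x => x ≠ [])))
        (all, all.filter (fun x => x ≠ []))).2
      = (all.filter (fun x => x ≠ [])) ++ l.flatMap (pvBlock coauthors) := by
    intro l
    induction l with
    | nil => intro _ h; exact absurd rfl h
    | cons x xs ih =>
      intro all _
      simp only [List.foldl_cons, List.flatMap_cons]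
      have hinner : coauthors.foldl (fun acc item => if x ∈ item then acc ++ [item] else acc) []
          = coauthors.filter (fun item => decide (x ∈ item)) := by
        simpa using PySem.List.foldl_append_ite_eq_filter (l := coauthors)
          (p := fun item => x ∈ item) (acc := [])
      rcases List.eq_nil_or_concat' xs with rfl | _
      · -- last author: the fold ends here, read off the second component
        simp only [List.foldl_nil, List.flatMap_nil, List.append_nil]
        rw [hinner]
        unfold pvBlock
        by_cases h : coauthors.filter (fun item => decide (x ∈ item)) = []
        · simp [h, List.filter_append]
        · simp [h, List.filter_append]
      · -- more authors follow: apply the induction hypothesis to the new accumulator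
        have hxs : xs ≠ [] := by rename_i hcat; rcases hcat with ⟨ys, y, rfl⟩; simp
        rw [ih _ hxs, hinner]
        unfold pvBlock
        by_cases h : coauthors.filter (fun item => decide (x ∈ item)) = []
        · simp [h, List.filter_append]
        · simp [h, List.filter_append]
  simpa using hgen authors [] hne

-- ===== VERDICT (by name: the statement is the Claim_ definition above) =====
theorem get_coauthors_nested_spec : Claim_equal_get_coauthors_nested := by
  intro coauthors authors _ hpre
  unfold Spec_get_coauthors_nested
  rw [a_eq_flatMap coauthors authors hpre, alt_eq_flatMap]
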